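-- pv_equiv track=rewrite | github.com/maxwshen/piu-analysis | src/hmm_segment.py | combine_bounds
-- ===== SOURCE A (Python) =====
-- def combine_bounds(bounds, max_indiv_len = 16):
--   # max_indiv_len: if greater than this, do not combine
--   new_bounds = []
--   comb_to_indiv = {}
--   i = 0
--   bound_len = lambda b: b[1] - b[0]
--
--   while i < len(bounds):
--     if bound_len(bounds[i]) <= max_indiv_len:
--       j = i + 1
--       while j < len(bounds) and bound_len(bounds[j]) <= max_indiv_len:
--         j += 1
--       cbound = (bounds[i][0], bounds[j-1][1])
--       comb_to_indiv[len(new_bounds)] = list(range(i, j))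
--       new_bounds.append(cbound)
--       i = j
--     else:
--       comb_to_indiv[len(new_bounds)] = [i]
--       new_bounds.append(bounds[i])
--       i += 1
--
--   return new_bounds, comb_to_indiv
-- ===== SOURCE B (Python) =====
-- def combine_bounds(bounds, max_indiv_len = 16):
--   # Staged pipeline: (1) compute the shortness flag of every bound, (2) run-length
--   # encode the flag list into maximal index runs, (3) emit: one combined tuple per
--   # short run, and each bound of a long run individually.
--   short = [b[1] - b[0] <= max_indiv_len for b in bounds]
--
--   runs = []  # run-length encoding of `short`: (start, end, flag)
--   i = 0
--   for f in short:
--     if runs and runs[-1][2] == f: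
--       runs[-1] = (runs[-1][0], i + 1, f)
--     else:
--       runs.append((i, i + 1, f))
--     i += 1
--
--   new_bounds = []
--   comb_to_indiv = {}
--   for s, e, f in runs:
--     if f:
--       comb_to_indiv[len(new_bounds)] = list(range(s, e))
--       new_bounds.append((bounds[s][0], bounds[e - 1][1]))
--     else:
--       for i in range(s, e):
--         comb_to_indiv[len(new_bounds)] = [i]
--         new_bounds.append(bounds[i])
--   return new_bounds, comb_to_indiv
-- ===== Notes on version B (the rewrite author's own statement) =====
-- stated objective: alternative
-- what changed: Replaces A's indexed while-loop with an inner lookahead scan by a three-stage pipeline: compute a shortness flag per bound, run-length encode the flag list into maximal index runs, then emit one combined tuple per short run and each bound of a long run individually.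
import Mathlib
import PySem

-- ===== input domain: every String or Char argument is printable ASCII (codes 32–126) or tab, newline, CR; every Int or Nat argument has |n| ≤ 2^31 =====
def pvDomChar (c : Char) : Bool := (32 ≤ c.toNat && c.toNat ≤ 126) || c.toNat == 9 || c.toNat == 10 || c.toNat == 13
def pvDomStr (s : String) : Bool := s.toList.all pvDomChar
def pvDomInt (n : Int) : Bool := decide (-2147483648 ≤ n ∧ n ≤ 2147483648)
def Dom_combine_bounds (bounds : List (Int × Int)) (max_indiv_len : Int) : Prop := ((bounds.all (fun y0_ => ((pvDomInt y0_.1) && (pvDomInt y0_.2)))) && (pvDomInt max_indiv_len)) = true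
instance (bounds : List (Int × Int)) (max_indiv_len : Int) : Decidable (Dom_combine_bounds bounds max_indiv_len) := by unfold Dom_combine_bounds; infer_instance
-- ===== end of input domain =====

-- B replaces A's indexed while-loop with inner lookahead by a staged pipeline
-- (flag list -> run-length encoding -> emission); objective: alternative
-- decomposition, same O(n) cost.

-- ===== PORT A =====
-- inner while: 'while j < len(bounds) and bound_len(bounds[j]) <= max_indiv_len: j += 1'
-- (indices are always in range in the Python, so bounds[k] is ported as getD k (0,0);
--  fuel = len(bounds) is a pure totality guard: j advances by 1 per step)
def pvFindJ (bounds : List (Int × Int)) (m : Int) (fuel j : Nat) : Nat :=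
  match fuel with
  | 0 => j
  | Nat.succ f =>
    if _h : j < bounds.length ∧ (bounds.getD j (0, 0)).2 - (bounds.getD j (0, 0)).1 ≤ m then
      pvFindJ bounds m f (j + 1)
    else j

-- outer while loop of A (fuel = len(bounds), a totality guard: i strictly increases);
-- dict assignment comb_to_indiv[len(new_bounds)] = … always uses a fresh key
-- (len(new_bounds) strictly increases), so it is ported as list append.
def pvLoopA (bounds : List (Int × Int)) (m : Int) (fuel i : Nat)
    (nb : List (Int × Int)) (cti : List (Int × List Int)) :
    (List (Int × Int)) × (List (Int × List Int)) :=
  match fuel with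
  | 0 => (nb, cti)
  | Nat.succ f =>
    if _h : i < bounds.length then
      if (bounds.getD i (0, 0)).2 - (bounds.getD i (0, 0)).1 ≤ m then
        let j := pvFindJ bounds m bounds.length (i + 1)
        pvLoopA bounds m f j
          (nb ++ [((bounds.getD i (0, 0)).1, (bounds.getD (j - 1) (0, 0)).2)])
          (cti ++ [((nb.length : Int), PySem.List.pyRange (i : Int) (j : Int) 1)])
      else
        pvLoopA bounds m f (i + 1)
          (nb ++ [bounds.getD i (0, 0)])
          (cti ++ [((nb.length : Int), [(i : Int)])])
    else (nb, cti)

def combine_bounds (bounds : List (Int × Int)) (max_indiv_len : Int) :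
    (List (Int × Int)) × (List (Int × List Int)) :=
  pvLoopA bounds max_indiv_len bounds.length 0 [] []

-- ===== PORT B =====
-- stage 2 of B: run-length encode the flag list into (start, end, flag) runs;
-- 'runs[-1] = (runs[-1][0], i + 1, f)' rewrites the last run: dropLast ++ [updated]
def pvRunStep (runs : List (Nat × Nat × Bool)) (i : Nat) (f : Bool) : List (Nat × Nat × Bool) :=
  match runs.getLast? with
  | some (s, _, g) => if g == f then runs.dropLast ++ [(s, i + 1, f)] else runs ++ [(i, i + 1, f)]
  | none => runs ++ [(i, i + 1, f)]

-- the 'for f in short' loop, carrying the running index i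
def pvRuns (flags : List Bool) : List (Nat × Nat × Bool) :=
  (flags.foldl (fun st f => (st.1 + 1, pvRunStep st.2 st.1 f)) ((0 : Nat), ([] : List (Nat × Nat × Bool)))).2

-- stage 3 of B: emit one combined tuple per short run, each bound of a long run
-- individually (inner 'for i in range(s, e)' ported over List.range' s (e - s),
-- exact since 0 ≤ s ≤ e for every run); fresh dict keys ported as append, as in A
def pvEmitRun (bounds : List (Int × Int)) (st : (List (Int × Int)) × (List (Int × List Int)))
    (r : Nat × Nat × Bool) : (List (Int × Int)) × (List (Int × List Int)) :=
  if r.2.2 then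
    (st.1 ++ [((bounds.getD r.1 (0, 0)).1, (bounds.getD (r.2.1 - 1) (0, 0)).2)],
     st.2 ++ [((st.1.length : Int), PySem.List.pyRange (r.1 : Int) (r.2.1 : Int) 1)])
  else
    (List.range' r.1 (r.2.1 - r.1)).foldl
      (fun st2 i => (st2.1 ++ [bounds.getD i (0, 0)],
                     st2.2 ++ [((st2.1.length : Int), [(i : Int)])])) st

def combine_bounds_alt (bounds : List (Int × Int)) (max_indiv_len : Int) :
    (List (Int × Int)) × (List (Int × List Int)) :=
  (pvRuns (bounds.map (fun b => decide (b.2 - b.1 ≤ max_indiv_len)))).foldl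
    (pvEmitRun bounds) ([], [])

-- ===== PRECONDITION & SPEC =====
def Spec_combine_bounds (bounds : List (Int × Int)) (max_indiv_len : Int) (out : (List (Int × Int)) × (List (Int × List Int))) : Prop := out = combine_bounds_alt bounds max_indiv_len
instance (bounds : List (Int × Int)) (max_indiv_len : Int) (out : (List (Int × Int)) × (List (Int × List Int))) : Decidable (Spec_combine_bounds bounds max_indiv_len out) := by unfold Spec_combine_bounds; infer_instance

-- ===== CLAIM (what is proved, stated in full; the proofs are below) =====
def Claim_equal_combine_bounds : Prop := ∀ (bounds : List (Int × Int)) (max_indiv_len : Int), Dom_combine_bounds bounds max_indiv_len → Spec_combine_bounds bounds max_indiv_len (combine_bounds bounds max_indiv_len)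

-- ===== LEMMAS AND PROOFS =====

-- recursive characterisation of the run-length encoder: pvGrp s f k rest groups
-- rest (whose first index is k) given a pending run (s, k, f)
def pvGrp (s : Nat) (f : Bool) (k : Nat) (rest : List Bool) : List (Nat × Nat × Bool) :=
  match rest with
  | [] => [(s, k, f)]
  | g :: r => if g == f then pvGrp s f (k + 1) r else (s, k, f) :: pvGrp k g (k + 1) r

def pvGrpStart (k : Nat) (l : List Bool) : List (Nat × Nat × Bool) :=
  match l with
  | [] => []
  | f :: r => pvGrp k f (k + 1) r

-- proof-only mirror of pvFindJ scanning while LONG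
def pvFindF (bounds : List (Int × Int)) (m : Int) (fuel k : Nat) : Nat :=
  match fuel with
  | 0 => k
  | Nat.succ f =>
    if _h : k < bounds.length ∧ ¬ (bounds.getD k (0, 0)).2 - (bounds.getD k (0, 0)).1 ≤ m then
      pvFindF bounds m f (k + 1)
    else k

def pvFlags (bounds : List (Int × Int)) (m : Int) : List Bool :=
  bounds.map (fun b => decide (b.2 - b.1 ≤ m))

theorem pvFindJ_ge (bounds : List (Int × Int)) (m : Int) (fuel : Nat) :
    ∀ j, j ≤ pvFindJ bounds m fuel j := by
  induction fuel with
  | zero => intro j; simp [pvFindJ]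
  | succ f ih =>
    intro j
    rw [pvFindJ]
    split
    · have := ih (j + 1); omega
    · exact Nat.le_refl j

theorem pvFindJ_le (bounds : List (Int × Int)) (m : Int) (fuel : Nat) :
    ∀ j, j ≤ bounds.length → pvFindJ bounds m fuel j ≤ bounds.length := by
  induction fuel with
  | zero => intro j h; simpa [pvFindJ] using h
  | succ f ih =>
    intro j h
    rw [pvFindJ]
    split
    · exact ih (j + 1) (by omega)
    · exact h

theorem pvFindJ_succ (bounds : List (Int × Int)) (m : Int) (fuel : Nat) :
    ∀ j, bounds.length - j ≤ fuel → pvFindJ bounds m (fuel + 1) j = pvFindJ bounds m fuel j := by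
  induction fuel with
  | zero =>
    intro j h
    rw [pvFindJ, pvFindJ]
    rw [dif_neg (by omega)]
  | succ f ih =>
    intro j h
    rw [pvFindJ]
    conv_rhs => rw [pvFindJ]
    split
    · exact ih (j + 1) (by omega)
    · rfl

theorem pvFindJ_step_short (bounds : List (Int × Int)) (m : Int) (idx : Nat)
    (hlt : idx < bounds.length)
    (hshort : (bounds.getD idx (0, 0)).2 - (bounds.getD idx (0, 0)).1 ≤ m) :
    pvFindJ bounds m bounds.length idx = pvFindJ bounds m bounds.length (idx + 1) := by
  obtain ⟨f, hf⟩ : ∃ f, bounds.length = f + 1 := ⟨bounds.length - 1, by omega⟩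
  calc pvFindJ bounds m bounds.length idx
      = pvFindJ bounds m f (idx + 1) := by
        rw [hf, pvFindJ, dif_pos ⟨hlt, hshort⟩]
    _ = pvFindJ bounds m (f + 1) (idx + 1) :=
        (pvFindJ_succ bounds m f (idx + 1) (by omega)).symm
    _ = pvFindJ bounds m bounds.length (idx + 1) := by rw [hf]

theorem pvFindJ_step_long (bounds : List (Int × Int)) (m : Int) (fuel idx : Nat)
    (h : ¬ (idx < bounds.length ∧ (bounds.getD idx (0, 0)).2 - (bounds.getD idx (0, 0)).1 ≤ m)) :
    pvFindJ bounds m fuel idx = idx := by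
  cases fuel with
  | zero => rw [pvFindJ]
  | succ f => rw [pvFindJ, dif_neg h]

theorem pvFindF_ge (bounds : List (Int × Int)) (m : Int) (fuel : Nat) :
    ∀ j, j ≤ pvFindF bounds m fuel j := by
  induction fuel with
  | zero => intro j; simp [pvFindF]
  | succ f ih =>
    intro j
    rw [pvFindF]
    split
    · have := ih (j + 1); omega
    · exact Nat.le_refl j

theorem pvFindF_le (bounds : List (Int × Int)) (m : Int) (fuel : Nat) :
    ∀ j, j ≤ bounds.length → pvFindF bounds m fuel j ≤ bounds.length := by
  induction fuel with
  | zero => intro j h; simpa [pvFindF] using h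
  | succ f ih =>
    intro j h
    rw [pvFindF]
    split
    · exact ih (j + 1) (by omega)
    · exact h

theorem pvFindF_succ (bounds : List (Int × Int)) (m : Int) (fuel : Nat) :
    ∀ j, bounds.length - j ≤ fuel → pvFindF bounds m (fuel + 1) j = pvFindF bounds m fuel j := by
  induction fuel with
  | zero =>
    intro j h
    rw [pvFindF, pvFindF]
    rw [dif_neg (by omega)]
  | succ f ih =>
    intro j h
    rw [pvFindF]
    conv_rhs => rw [pvFindF]
    split
    · exact ih (j + 1) (by omega)
    · rfl

theorem pvFindF_step_long (bounds : List (Int × Int)) (m : Int) (idx : Nat)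
    (hlt : idx < bounds.length)
    (hlong : ¬ (bounds.getD idx (0, 0)).2 - (bounds.getD idx (0, 0)).1 ≤ m) :
    pvFindF bounds m bounds.length idx = pvFindF bounds m bounds.length (idx + 1) := by
  obtain ⟨f, hf⟩ : ∃ f, bounds.length = f + 1 := ⟨bounds.length - 1, by omega⟩
  calc pvFindF bounds m bounds.length idx
      = pvFindF bounds m f (idx + 1) := by
        rw [hf, pvFindF, dif_pos ⟨hlt, hlong⟩]
    _ = pvFindF bounds m (f + 1) (idx + 1) :=
        (pvFindF_succ bounds m f (idx + 1) (by omega)).symm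
    _ = pvFindF bounds m bounds.length (idx + 1) := by rw [hf]

theorem pvFindF_step_short (bounds : List (Int × Int)) (m : Int) (fuel idx : Nat)
    (h : ¬ (idx < bounds.length ∧ ¬ (bounds.getD idx (0, 0)).2 - (bounds.getD idx (0, 0)).1 ≤ m)) :
    pvFindF bounds m fuel idx = idx := by
  cases fuel with
  | zero => rw [pvFindF]
  | succ f => rw [pvFindF, dif_neg h]

-- the run-building fold equals the recursive grouper pvGrp
theorem foldl_runStep_eq_grp (rest : List Bool) :
    ∀ (i s : Nat) (f : Bool) (acc : List (Nat × Nat × Bool)),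
    (rest.foldl (fun st g => (st.1 + 1, pvRunStep st.2 st.1 g)) (i, acc ++ [(s, i, f)])).2
      = acc ++ pvGrp s f i rest := by
  induction rest with
  | nil => intro i s f acc; simp [pvGrp]
  | cons g r ih =>
    intro i s f acc
    by_cases hgf : g = f
    · subst hgf
      have hstep : pvRunStep (acc ++ [(s, i, g)]) i g = acc ++ [(s, i + 1, g)] := by
        simp [pvRunStep]
      simp only [List.foldl_cons, hstep, pvGrp, BEq.rfl, if_pos]
      exact ih (i + 1) s g acc
    · have hstep : pvRunStep (acc ++ [(s, i, f)]) i g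
          = (acc ++ [(s, i, f)]) ++ [(i, i + 1, g)] := by
        simp [pvRunStep, Ne.symm hgf]
      simp only [List.foldl_cons, hstep]
      have := ih (i + 1) i g (acc ++ [(s, i, f)])
      rw [this, pvGrp, if_neg (by simpa using hgf)]
      simp

theorem pvRuns_eq_grpStart (flags : List Bool) : pvRuns flags = pvGrpStart 0 flags := by
  cases flags with
  | nil => simp [pvRuns, pvGrpStart]
  | cons f r =>
    have h0 : pvRunStep [] 0 f = [] ++ [(0, 1, f)] := by simp [pvRunStep]
    unfold pvRuns
    simp only [List.foldl_cons, h0]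
    exact foldl_runStep_eq_grp r 1 0 f []

theorem pvFlags_drop_cons (bounds : List (Int × Int)) (m : Int) (k : Nat)
    (hk : k < bounds.length) :
    (pvFlags bounds m).drop k
      = decide ((bounds.getD k (0, 0)).2 - (bounds.getD k (0, 0)).1 ≤ m)
        :: (pvFlags bounds m).drop (k + 1) := by
  have hlen : k < (pvFlags bounds m).length := by simpa [pvFlags] using hk
  have hgd : bounds.getD k (0, 0) = bounds[k] := List.getD_eq_getElem _ _ hk
  rw [List.drop_eq_getElem_cons hlen, hgd]
  simp [pvFlags]

-- a pending TRUE run ends exactly at pvFindJ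
theorem grp_true (bounds : List (Int × Int)) (m : Int) :
    ∀ (k s : Nat), k ≤ bounds.length →
    pvGrp s true k ((pvFlags bounds m).drop k)
      = (s, pvFindJ bounds m bounds.length k, true)
        :: pvGrpStart (pvFindJ bounds m bounds.length k)
             ((pvFlags bounds m).drop (pvFindJ bounds m bounds.length k)) := by
  intro k s hk
  by_cases hlt : k < bounds.length
  · rw [pvFlags_drop_cons bounds m k hlt]
    by_cases hshort : (bounds.getD k (0, 0)).2 - (bounds.getD k (0, 0)).1 ≤ m
    · rw [pvGrp, if_pos (by simpa using hshort),
        pvFindJ_step_short bounds m k hlt hshort]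
      exact grp_true bounds m (k + 1) s (by omega)
    · have hJ : pvFindJ bounds m bounds.length k = k :=
        pvFindJ_step_long bounds m _ k (by tauto)
      rw [pvGrp, if_neg (by simpa using hshort), hJ,
        pvFlags_drop_cons bounds m k hlt, pvGrpStart]
  · have hk' : k = bounds.length := by omega
    have hJ : pvFindJ bounds m bounds.length k = k :=
      pvFindJ_step_long bounds m _ k (by omega)
    have hdrop : (pvFlags bounds m).drop k = [] := by
      apply List.drop_eq_nil_of_le; simp [pvFlags]; omega
    rw [hdrop, hJ, hdrop, pvGrp, pvGrpStart]
termination_by k => bounds.length - k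

-- a pending FALSE run ends exactly at pvFindF
theorem grp_false (bounds : List (Int × Int)) (m : Int) :
    ∀ (k s : Nat), k ≤ bounds.length →
    pvGrp s false k ((pvFlags bounds m).drop k)
      = (s, pvFindF bounds m bounds.length k, false)
        :: pvGrpStart (pvFindF bounds m bounds.length k)
             ((pvFlags bounds m).drop (pvFindF bounds m bounds.length k)) := by
  intro k s hk
  by_cases hlt : k < bounds.length
  · rw [pvFlags_drop_cons bounds m k hlt]
    by_cases hshort : (bounds.getD k (0, 0)).2 - (bounds.getD k (0, 0)).1 ≤ m
    · have hF : pvFindF bounds m bounds.length k = k :=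
        pvFindF_step_short bounds m _ k (by tauto)
      rw [pvGrp, if_neg (by simpa using hshort), hF,
        pvFlags_drop_cons bounds m k hlt, pvGrpStart]
    · rw [pvGrp, if_pos (by simpa using hshort),
        pvFindF_step_long bounds m k hlt hshort]
      exact grp_false bounds m (k + 1) s (by omega)
  · have hk' : k = bounds.length := by omega
    have hF : pvFindF bounds m bounds.length k = k :=
      pvFindF_step_short bounds m _ k (by omega)
    have hdrop : (pvFlags bounds m).drop k = [] := by
      apply List.drop_eq_nil_of_le; simp [pvFlags]; omega
    rw [hdrop, hF, hdrop, pvGrp, pvGrpStart]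
termination_by k => bounds.length - k

-- empty pvGrpStart at the end of the list
theorem grpStart_end (bounds : List (Int × Int)) (m : Int) (i : Nat)
    (h : bounds.length ≤ i) : pvGrpStart i ((pvFlags bounds m).drop i) = [] := by
  have : (pvFlags bounds m).drop i = [] := by
    apply List.drop_eq_nil_of_le; simp [pvFlags]; omega
  rw [this, pvGrpStart]

-- main bridge: A's loop from index i = B's emission over the runs of the suffix
theorem pvLoopA_eq_emit (bounds : List (Int × Int)) (m : Int) (fuel : Nat) :
    ∀ (i : Nat) (nb : List (Int × Int)) (cti : List (Int × List Int)),
    i ≤ bounds.length → bounds.length - i ≤ fuel →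
    pvLoopA bounds m fuel i nb cti
      = (pvGrpStart i ((pvFlags bounds m).drop i)).foldl (pvEmitRun bounds) (nb, cti) := by
  induction fuel with
  | zero =>
    intro i nb cti h hf
    have : i = bounds.length := by omega
    subst this
    rw [grpStart_end bounds m _ (le_refl _)]
    simp [pvLoopA]
  | succ f ih =>
    intro i nb cti h hf
    by_cases hlt : i < bounds.length
    · by_cases hshort : (bounds.getD i (0, 0)).2 - (bounds.getD i (0, 0)).1 ≤ m
      · -- short bound: run (i, J, true), J = pvFindJ (i+1)
        have hJge := pvFindJ_ge bounds m bounds.length (i + 1)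
        have hJle := pvFindJ_le bounds m bounds.length (i + 1) (by omega)
        rw [pvLoopA, dif_pos hlt, if_pos hshort]
        rw [pvFlags_drop_cons bounds m i hlt, pvGrpStart, decide_eq_true hshort,
          grp_true bounds m (i + 1) i (by omega)]
        rw [List.foldl_cons]
        have hemit : pvEmitRun bounds (nb, cti)
            (i, pvFindJ bounds m bounds.length (i + 1), true)
            = (nb ++ [((bounds.getD i (0, 0)).1,
                  (bounds.getD (pvFindJ bounds m bounds.length (i + 1) - 1) (0, 0)).2)],
               cti ++ [((nb.length : Int),
                  PySem.List.pyRange (i : Int) ((pvFindJ bounds m bounds.length (i + 1) : Nat) : Int) 1)]) := by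
          simp [pvEmitRun]
        rw [hemit]
        exact ih _ _ _ hJle (by omega)
      · -- long bound: run (i, E, false), E = pvFindF (i+1)
        have hEge := pvFindF_ge bounds m bounds.length (i + 1)
        have hEle := pvFindF_le bounds m bounds.length (i + 1) (by omega)
        rw [pvLoopA, dif_pos hlt, if_neg hshort]
        rw [pvFlags_drop_cons bounds m i hlt, pvGrpStart, decide_eq_false hshort,
          grp_false bounds m (i + 1) i (by omega)]
        rw [List.foldl_cons]
        rw [ih (i + 1) _ _ (by omega) (by omega)]
        set E := pvFindF bounds m bounds.length (i + 1) with hE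
        by_cases hE1 : E = i + 1
        · -- run is a single long bound
          have hemit : pvEmitRun bounds (nb, cti) (i, E, false)
              = (nb ++ [bounds.getD i (0, 0)], cti ++ [((nb.length : Int), [(i : Int)])]) := by
            rw [hE1]
            simp [pvEmitRun, List.range'_one]
          rw [hemit, hE1]
        · -- run continues: i+1 < E, so flags[i+1] = false and it heads the same run
          have hilt : i + 1 < bounds.length := by
            by_contra hc
            have : E = i + 1 := pvFindF_step_short bounds m _ (i + 1) (by omega)
            exact hE1 this
          have hlong1 : ¬ (bounds.getD (i + 1) (0, 0)).2 - (bounds.getD (i + 1) (0, 0)).1 ≤ m := by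
            by_contra hc
            have : E = i + 1 := pvFindF_step_short bounds m _ (i + 1) (by tauto)
            exact hE1 this
          rw [pvFlags_drop_cons bounds m (i + 1) hilt, pvGrpStart, decide_eq_false hlong1]
          rw [grp_false bounds m (i + 2) (i + 1) (by omega),
            ← pvFindF_step_long bounds m (i + 1) hilt hlong1, ← hE]
          rw [List.foldl_cons]
          congr 1
          -- emitting run (i, E, false) from (nb,cti) = emitting (i+1, E, false)
          -- from the state after the single bound i
          have hrange : List.range' i (E - i) = i :: List.range' (i + 1) (E - (i + 1)) := by
            have : E - i = (E - (i + 1)) + 1 := by omega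
            rw [this, List.range'_succ]
          simp only [pvEmitRun, if_neg (Bool.false_ne_true), hrange, List.foldl_cons]
    · have : i = bounds.length := by omega
      subst this
      rw [grpStart_end bounds m _ (le_refl _)]
      rw [pvLoopA, dif_neg (by omega)]
      simp

-- ===== VERDICT (by name: the statement is the Claim_ definition above) =====
theorem combine_bounds_spec : Claim_equal_combine_bounds := by
  intro bounds m _
  unfold Spec_combine_bounds combine_bounds combine_bounds_alt
  rw [pvRuns_eq_grpStart]
  have := pvLoopA_eq_emit bounds m bounds.length 0 [] [] (by omega) (by omega)
  simpa [pvFlags] using this
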